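-- pv_equiv track=rewrite | github.com/Accomplished-Table-6/mozartai | final_program.py | group_measures
-- ===== SOURCE A (Python) =====
-- def group_measures(notes):
--     measures = []
--     current_measure = []
--
--     for item in notes:
--         if item == "barline":
--             measures.append(current_measure)
--             current_measure = []
--         else:
--             current_measure.append(item)
--
--     if current_measure:  # Add the last measure if not empty
--         measures.append(current_measure)
--
--     return measures
-- ===== SOURCE B (Python) =====
-- def group_measures(notes):
--     # Cut the list between barline positions: repeatedly find the next
--     # "barline" and slice off everything before it as one measure.
--     measures = []
--     rest = notes
--     while True:
--         try:
--             i = rest.index("barline")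
--         except ValueError:
--             break
--         measures.append(rest[:i])
--         rest = rest[i + 1:]
--     if rest:
--         measures.append(rest)
--     return measures
-- ===== Notes on version B (the rewrite author's own statement) =====
-- stated objective: alternative
-- what changed: B builds measures by repeatedly locating the next 'barline' with list.index and slicing the list between cut points, instead of A's item-by-item accumulation into a temporary current_measure.
import Mathlib
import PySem

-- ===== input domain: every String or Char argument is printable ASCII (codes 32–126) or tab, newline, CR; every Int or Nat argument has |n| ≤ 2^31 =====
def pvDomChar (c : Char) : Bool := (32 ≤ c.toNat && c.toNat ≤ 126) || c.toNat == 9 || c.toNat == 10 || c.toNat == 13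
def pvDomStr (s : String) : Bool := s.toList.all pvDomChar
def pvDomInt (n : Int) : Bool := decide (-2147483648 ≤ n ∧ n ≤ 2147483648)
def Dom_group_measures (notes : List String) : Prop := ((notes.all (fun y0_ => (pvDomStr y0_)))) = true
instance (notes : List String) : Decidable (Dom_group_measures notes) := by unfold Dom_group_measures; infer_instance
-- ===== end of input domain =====

-- B groups by slicing between computed barline positions instead of A's item-by-item
-- accumulation into a temporary current measure (objective: alternative decomposition).

-- ===== PORT A =====
-- one loop step: on "barline" flush current_measure, else append the item to it
def pvStepA (s : List (List String) × List String) (item : String) :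
    List (List String) × List String :=
  if item == "barline" then (s.1 ++ [s.2], []) else (s.1, s.2 ++ [item])

def group_measures (notes : List String) : List (List String) :=
  let st := notes.foldl pvStepA ([], [])
  if st.2.isEmpty then st.1 else st.1 ++ [st.2]

-- ===== PORT B =====
-- Source B's while loop: find next "barline" (rest.index, none = break), slice before it,
-- continue on the slice after it; finally keep the remainder if non-empty.
def pvAltGo (rest : List String) : List (List String) :=
  match h : rest.findIdx? (· == "barline") with
  | none => if rest.isEmpty then [] else [rest]
  | some i => rest.take i :: pvAltGo (rest.drop (i + 1))
termination_by rest.length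
decreasing_by
  have hi := List.findIdx?_eq_some_iff_findIdx_eq.mp h
  simp [List.length_drop]
  omega

def group_measures_alt (notes : List String) : List (List String) := pvAltGo notes

-- ===== PRECONDITION & SPEC =====
def Spec_group_measures (notes : List String) (out : List (List String)) : Prop := out = group_measures_alt notes
instance (notes : List String) (out : List (List String)) : Decidable (Spec_group_measures notes out) := by unfold Spec_group_measures; infer_instance

-- ===== CLAIM (what is proved, stated in full; the proofs are below) =====
def Claim_equal_group_measures : Prop := ∀ (notes : List String), Dom_group_measures notes → Spec_group_measures notes (group_measures notes)

-- ===== LEMMAS AND PROOFS =====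

-- recursive characterisation of A's loop (current accumulator made explicit)
def pvG (cur : List String) : List String → List (List String)
  | [] => if cur.isEmpty then [] else [cur]
  | x :: xs => if x == "barline" then cur :: pvG [] xs else pvG (cur ++ [x]) xs

-- merge a pending prefix into the first measure of a grouping
def pvConsOnto (cur : List String) : List (List String) → List (List String)
  | [] => if cur.isEmpty then [] else [cur]
  | m :: ms => (cur ++ m) :: ms

theorem pvFoldA (notes : List String) : ∀ (ms : List (List String)) (cur : List String),
    (let st := notes.foldl pvStepA (ms, cur)
     if st.2.isEmpty then st.1 else st.1 ++ [st.2]) = ms ++ pvG cur notes := by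
  induction notes with
  | nil =>
    intro ms cur
    by_cases h : cur.isEmpty <;> simp_all [pvG]
  | cons x xs ih =>
    intro ms cur
    by_cases h : x = "barline"
    · simpa [pvStepA, pvG, h] using ih (ms ++ [cur]) []
    · simpa [pvStepA, pvG, h] using ih ms (cur ++ [x])

theorem pvConsOntoNil (l : List (List String)) : pvConsOnto [] l = l := by
  cases l <;> simp [pvConsOnto]

theorem pvAltGo_none (rest : List String) (h : rest.findIdx? (· == "barline") = none) :
    pvAltGo rest = if rest.isEmpty then [] else [rest] := by
  rw [pvAltGo]; split <;> simp_all

theorem pvAltGo_some (rest : List String) (i : Nat)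
    (h : rest.findIdx? (· == "barline") = some i) :
    pvAltGo rest = rest.take i :: pvAltGo (rest.drop (i + 1)) := by
  rw [pvAltGo]; split <;> simp_all

theorem pvGAlt (notes : List String) : ∀ (cur : List String),
    pvG cur notes = pvConsOnto cur (pvAltGo notes) := by
  induction notes with
  | nil => intro cur; rw [pvAltGo_none _ (by simp)]; simp [pvG, pvConsOnto]
  | cons x xs ih =>
    intro cur
    by_cases h : x = "barline"
    · have hf : (x :: xs).findIdx? (· == "barline") = some 0 := by simp [List.findIdx?_cons, h]
      rw [pvAltGo_some _ _ hf]
      simp only [pvG, h, beq_self_eq_true, if_pos, ih, List.take_zero, List.drop_succ_cons, List.drop_zero]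
      rw [pvConsOntoNil]
      simp [pvConsOnto]
    · cases hfi : xs.findIdx? (· == "barline") with
      | none =>
        have hf : (x :: xs).findIdx? (· == "barline") = none := by
          simp [List.findIdx?_cons, h, hfi]
        rw [pvAltGo_none _ hf]
        have hx : pvG (cur ++ [x]) xs = pvConsOnto (cur ++ [x]) (pvAltGo xs) := ih _
        rw [pvAltGo_none _ hfi] at hx
        by_cases hxs : xs.isEmpty
        · simp only [hxs, if_pos] at hx
          cases xs <;> simp_all [pvG, pvConsOnto]
        · simp only [hxs, Bool.false_eq_true, if_false] at hx
          simp [pvG, h, hx, pvConsOnto]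
      | some i =>
        have hf : (x :: xs).findIdx? (· == "barline") = some (i + 1) := by
          simp [List.findIdx?_cons, h, hfi]
        rw [pvAltGo_some _ _ hf]
        have hx : pvG (cur ++ [x]) xs = pvConsOnto (cur ++ [x]) (pvAltGo xs) := ih _
        rw [pvAltGo_some _ _ hfi] at hx
        simp [pvG, h, hx, pvConsOnto, List.take_succ_cons, List.drop_succ_cons]

-- ===== VERDICT (by name: the statement is the Claim_ definition above) =====
theorem group_measures_spec : Claim_equal_group_measures := by
  intro notes _
  unfold Spec_group_measures group_measures group_measures_alt
  have := pvFoldA notes [] []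
  simp only [List.nil_append] at this
  rw [this, pvGAlt, pvConsOntoNil]
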